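-- pv_equiv track=rewrite | github.com/Roofchick/vk_bot | func/append_attach.py | append_attach
-- ===== SOURCE A (Python) =====
-- def append_attach(mess):
-- 	ans = ''
-- 	regular = ''
-- 	attach = []
-- 	f = False
-- 	for i in mess:
-- 		if f:
-- 			if i == '*':
-- 				if regular[15:20] in ('photo', 'video', 'audio') or regular[15:19] in ('poll', 'wall') or regular[15:18] == 'doc' or regular[15:21] == 'market':
-- 					attach.append(regular[15:])
-- 				else:
-- 					ans += '*' + regular + '*'
-- 				regular = ''
-- 				f = False
-- 			else:
-- 				regular += i
-- 		else:
-- 			if i == '*':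
-- 				f = True
-- 				continue
-- 			ans += i
-- 	if regular != '':
-- 		ans += '*' + regular
-- 	return ans, attach, False
-- ===== SOURCE B (Python) =====
-- def append_attach(mess):
--     parts = mess.split('*')
--     ans = parts[0]
--     attach = []
--     it = parts[1:]
--     while len(it) >= 2:
--         tok, txt = it[0], it[1]
--         if tok[15:20] in ('photo', 'video', 'audio') or tok[15:19] in ('poll', 'wall') or tok[15:18] == 'doc' or tok[15:21] == 'market':
--             attach.append(tok[15:])
--             ans += txt
--         else:
--             ans += '*' + tok + '*' + txt
--         it = it[2:]
--     if it and it[0]: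
--         ans += '*' + it[0]
--     return ans, attach, False
-- ===== Notes on version B (the rewrite author's own statement) =====
-- stated objective: simpler
-- what changed: A's per-character state machine (flag f, incremental 'regular' buffer, char-by-char string concatenation) is replaced by splitting the message on the asterisk delimiter once and walking the pieces pairwise: each (token, following-text) pair is classified at once, the trailing unclosed piece is handled after the loop.
import Mathlib
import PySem

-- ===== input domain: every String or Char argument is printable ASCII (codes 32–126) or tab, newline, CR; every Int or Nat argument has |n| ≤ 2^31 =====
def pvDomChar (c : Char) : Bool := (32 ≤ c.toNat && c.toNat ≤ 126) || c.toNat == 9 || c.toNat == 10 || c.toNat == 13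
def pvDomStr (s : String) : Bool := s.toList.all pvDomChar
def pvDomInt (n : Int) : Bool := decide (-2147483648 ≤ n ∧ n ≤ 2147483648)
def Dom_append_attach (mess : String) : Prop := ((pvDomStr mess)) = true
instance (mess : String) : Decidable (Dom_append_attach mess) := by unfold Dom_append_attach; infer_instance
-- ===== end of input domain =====

-- B replaces A's one-character-at-a-time state machine by split('*') followed by a
-- pairwise (token, following-text) consumption of the pieces; objective: simpler.

-- ===== PORT A =====
-- the classification test 'regular[15:20] in (photo,video,audio) or …' — identical text in both Pythons
def pvIsAttach (tok : List Char) : Bool :=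
  (PySem.List.slice tok (some 15) (some 20) = "photo".toList ||
   PySem.List.slice tok (some 15) (some 20) = "video".toList ||
   PySem.List.slice tok (some 15) (some 20) = "audio".toList) ||
  (PySem.List.slice tok (some 15) (some 19) = "poll".toList ||
   PySem.List.slice tok (some 15) (some 19) = "wall".toList) ||
  PySem.List.slice tok (some 15) (some 18) = "doc".toList ||
  PySem.List.slice tok (some 15) (some 21) = "market".toList

-- regular[15:]
def pvTok15 (tok : List Char) : List Char := PySem.List.slice tok (some 15) none

-- A's for-loop over the characters of mess, state (ans, regular, attach, f)
def pvAGo (ans reg : List Char) (att : List (List Char)) (f : Bool) :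
    List Char → List Char × List Char × List (List Char)
  | [] => (ans, reg, att)
  | c :: cs =>
    if f then
      if c = '*' then
        if pvIsAttach reg then pvAGo ans [] (att ++ [pvTok15 reg]) false cs
        else pvAGo (ans ++ '*' :: reg ++ ['*']) [] att false cs
      else pvAGo ans (reg ++ [c]) att f cs
    else
      if c = '*' then pvAGo ans reg att true cs
      else pvAGo (ans ++ [c]) reg att f cs

def append_attach (mess : String) : String × List String × Bool :=
  let r := pvAGo [] [] [] false mess.toList
  -- trailing 'if regular != '': ans += '*' + regular'
  let ans := if r.2.1 ≠ [] then r.1 ++ '*' :: r.2.1 else r.1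
  (String.ofList ans, r.2.2.map String.ofList, false)

-- ===== PORT B =====
-- while len(it) >= 2: consume (tok, txt); then the trailing lone piece
def pvBGo (ans : List Char) (att : List (List Char)) :
    List (List Char) → List Char × List (List Char)
  | tok :: txt :: rest =>
    if pvIsAttach tok then pvBGo (ans ++ txt) (att ++ [pvTok15 tok]) rest
    else pvBGo (ans ++ '*' :: tok ++ '*' :: txt) att rest
  | [tok] => (if tok ≠ [] then ans ++ '*' :: tok else ans, att)
  | [] => (ans, att)

def append_attach_alt (mess : String) : String × List String × Bool :=
  match PySem.Chars.splitOn mess.toList ['*'] with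
  | [] => ("", [], false)   -- unreachable: split of any string is non-empty
  | p :: ps =>
    let r := pvBGo p [] ps
    (String.ofList r.1, r.2.map String.ofList, false)

-- ===== PRECONDITION & SPEC =====
def Spec_append_attach (mess : String) (out : String × List String × Bool) : Prop := out = append_attach_alt mess
instance (mess : String) (out : String × List String × Bool) : Decidable (Spec_append_attach mess out) := by unfold Spec_append_attach; infer_instance

-- ===== CLAIM (what is proved, stated in full; the proofs are below) =====
def Claim_equal_append_attach : Prop := ∀ (mess : String), Dom_append_attach mess → Spec_append_attach mess (append_attach mess)

-- ===== LEMMAS AND PROOFS =====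

-- head/tail of split-on-'*' as a pair (the split of a string is never empty)
def pvSplitP : List Char → List Char × List (List Char)
  | [] => ([], [])
  | c :: cs =>
    let r := pvSplitP cs
    if c = '*' then ([], r.1 :: r.2) else (c :: r.1, r.2)

theorem pvGo_eq (fuel : Nat) : ∀ (l cur : List Char) (acc : List (List Char)),
    l.length < fuel →
    PySem.Chars.splitOn.go ['*'] fuel l cur acc =
      acc.reverse ++ (cur.reverse ++ (pvSplitP l).1) :: (pvSplitP l).2 := by
  induction fuel with
  | zero => intro l cur acc h; omega
  | succ n ih =>
    intro l cur acc h
    cases l with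
    | nil => simp [PySem.Chars.splitOn.go, pvSplitP]
    | cons c rest =>
      by_cases hc : c = '*'
      · subst hc
        have hp : List.isPrefixOf ['*'] ('*' :: rest) = true := by
          simp [List.isPrefixOf]
        simp only [PySem.Chars.splitOn.go, hp, if_pos, List.length_cons, List.length_nil,
          List.drop_succ_cons, List.drop_zero]
        rw [ih rest [] (cur.reverse :: acc) (by simpa using Nat.lt_of_succ_lt_succ h)]
        simp [pvSplitP]
      · have hp : List.isPrefixOf ['*'] (c :: rest) = false := by
          simp [List.isPrefixOf, Ne.symm hc]
        simp only [PySem.Chars.splitOn.go, hp]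
        rw [ih rest (c :: cur) acc (by simpa using Nat.lt_of_succ_lt_succ h)]
        simp [pvSplitP, hc]

theorem pvSplitOn_eq (cs : List Char) :
    PySem.Chars.splitOn cs ['*'] = (pvSplitP cs).1 :: (pvSplitP cs).2 := by
  have := pvGo_eq (cs.length + 1) cs [] [] (Nat.lt_succ_self _)
  simpa [PySem.Chars.splitOn] using this

-- A's finishing step on the raw loop state
def pvFin (r : List Char × List Char × List (List Char)) : List Char × List (List Char) :=
  (if r.2.1 ≠ [] then r.1 ++ '*' :: r.2.1 else r.1, r.2.2)

-- joint invariant: the char scan in either mode equals the pairwise walk over the split pieces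
theorem pvMain (cs : List Char) :
    (∀ ans att, pvFin (pvAGo ans [] att false cs) =
        pvBGo (ans ++ (pvSplitP cs).1) att (pvSplitP cs).2) ∧
    (∀ ans reg att, pvFin (pvAGo ans reg att true cs) =
        pvBGo ans att ((reg ++ (pvSplitP cs).1) :: (pvSplitP cs).2)) := by
  induction cs with
  | nil =>
    constructor
    · intro ans att; simp [pvSplitP, pvAGo, pvBGo, pvFin]
    · intro ans reg att
      by_cases hreg : reg = []
      · subst hreg; simp [pvSplitP, pvAGo, pvBGo, pvFin]
      · simp [pvSplitP, pvAGo, pvBGo, pvFin, hreg]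
  | cons c cs ih =>
    obtain ⟨ihP, ihQ⟩ := ih
    constructor
    · intro ans att
      by_cases hc : c = '*'
      · subst hc
        simpa [pvAGo, pvSplitP] using ihQ ans [] att
      · have := ihP (ans ++ [c]) att
        simp only [pvAGo, if_neg hc, Bool.false_eq_true, if_false] at *
        simp [pvSplitP, hc, this]
    · intro ans reg att
      by_cases hc : c = '*'
      · subst hc
        by_cases ha : pvIsAttach reg
        · have := ihP ans (att ++ [pvTok15 reg])
          simp [pvAGo, pvSplitP, ha, pvBGo, this]
        · have h2 := ihP (ans ++ '*' :: reg ++ ['*']) att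
          simp only [List.append_assoc, List.cons_append, List.nil_append] at h2 ⊢
          simp [pvAGo, pvSplitP, ha, h2, pvBGo, List.append_assoc]
      · have := ihQ ans (reg ++ [c]) att
        simp [pvAGo, pvSplitP, hc, this]

-- ===== VERDICT (by name: the statement is the Claim_ definition above) =====
theorem append_attach_spec : Claim_equal_append_attach := by
  intro mess _
  unfold Spec_append_attach append_attach append_attach_alt
  rw [pvSplitOn_eq mess.toList]
  have h := (pvMain mess.toList).1 [] []
  unfold pvFin at h
  simp only [List.nil_append] at h
  rcases hr : pvAGo [] [] [] false mess.toList with ⟨a, r, t⟩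
  rw [hr] at h
  simp only at h ⊢
  rw [← h]
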